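-- pv_equiv track=rewrite | github.com/MrBrantCode/unitest_baseline | mut_generate/mist_train_taco/taco_19078/solution.py | min_moves_to_reach_end
-- ===== SOURCE A (Python) =====
-- import bisect
--
-- def min_moves_to_reach_end(n, m, k, special_cells):
--     def longest_incr_length(s):
--         vec_last = []
--         for x in s:
--             i = bisect.bisect_left(vec_last, x)
--             if i != len(vec_last):
--                 vec_last[i] = x
--             else:
--                 vec_last.append(x)
--         return len(vec_last)
--
--     # Filter out special cells that are not useful
--     specials = [(sx, sy) for (sx, sy) in special_cells if sx != n and sy != m]
--
--     # Sort the special cells based on their coordinates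
--     specials.sort(key=lambda p: (p[0], -p[1]))
--
--     # Calculate the longest increasing subsequence of y-coordinates
--     max_spec = longest_incr_length([y for (x, y) in specials])
--
--     # Calculate the minimum number of moves
--     return m + n - 2 - max_spec
-- ===== SOURCE B (Python) =====
-- def min_moves_to_reach_end(n, m, k, special_cells):
--     specials = sorted([(sx, sy) for (sx, sy) in special_cells if sx != n and sy != m],
--                       key=lambda p: (p[0], -p[1]))
--     s = [y for (x, y) in specials]
--     # O(N^2) DP: dp value for each element = 1 + best dp among earlier strictly-smaller ys
--     done = []          # (y, dp) for the elements already processed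
--     max_spec = 0
--     for x in s:
--         best = 0
--         for (y, d) in done:
--             if y < x and d > best:
--                 best = d
--         done.append((x, best + 1))
--         if best + 1 > max_spec:
--             max_spec = best + 1
--     return m + n - 2 - max_spec
-- ===== Notes on version B (the rewrite author's own statement) =====
-- stated objective: alternative
-- what changed: replaces the bisect-based patience-sorting LIS helper with a quadratic left-to-right DP (dp[i] = 1 + best dp over earlier strictly smaller y's) while keeping the same filter and sort
import Mathlib
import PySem

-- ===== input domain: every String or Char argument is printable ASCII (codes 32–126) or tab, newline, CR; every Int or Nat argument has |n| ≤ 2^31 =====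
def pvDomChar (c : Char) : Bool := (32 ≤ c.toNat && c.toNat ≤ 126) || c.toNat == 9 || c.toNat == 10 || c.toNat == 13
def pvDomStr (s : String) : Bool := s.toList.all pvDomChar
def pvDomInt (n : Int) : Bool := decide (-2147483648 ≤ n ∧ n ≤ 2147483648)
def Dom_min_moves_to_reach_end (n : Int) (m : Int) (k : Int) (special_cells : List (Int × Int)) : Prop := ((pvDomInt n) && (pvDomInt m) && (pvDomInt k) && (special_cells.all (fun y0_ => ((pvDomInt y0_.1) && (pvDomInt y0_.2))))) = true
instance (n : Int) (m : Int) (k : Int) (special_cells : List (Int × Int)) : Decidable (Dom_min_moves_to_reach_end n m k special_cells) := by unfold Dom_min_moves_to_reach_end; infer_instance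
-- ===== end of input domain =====

-- B replaces A's bisect-based patience-sorting LIS helper by a quadratic DP over the same
-- filtered-and-sorted y-sequence (objective: alternative algorithm; not faster).

-- ===== PORT A =====
-- one iteration of A's `for x in s` loop over vec_last
def pvAStep (vec : List Int) (x : Int) : List Int :=
  let i := PySem.List.bisectLeft vec x
  if i ≠ vec.length then vec.set i x else vec ++ [x]

-- A's helper longest_incr_length
def pvLongestIncrLength (s : List Int) : Nat :=
  (s.foldl pvAStep []).length

def min_moves_to_reach_end (n : Int) (m : Int) (k : Int) (special_cells : List (Int × Int)) : Int :=
  let specials := PySem.List.sorted2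
    (special_cells.filter (fun p => p.1 != n && p.2 != m))
    (fun p => p.1) (fun p => -p.2)
  let max_spec := pvLongestIncrLength (specials.map (fun p => p.2))
  m + n - 2 - (max_spec : Int)

-- ===== PORT B =====
-- B's inner loop: best dp value among processed pairs (y, d) with y < x
def pvBBest (done : List (Int × Int)) (x : Int) : Int :=
  done.foldl (fun best p => if p.1 < x ∧ p.2 > best then p.2 else best) 0

-- B's outer loop, carrying the processed (y, dp) pairs and the running maximum
def pvBLoop : List (Int × Int) → Int → List Int → Int
  | _, max_spec, [] => max_spec
  | done, max_spec, x :: rest =>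
      let best := pvBBest done x
      pvBLoop (done ++ [(x, best + 1)])
        (if best + 1 > max_spec then best + 1 else max_spec) rest

def min_moves_to_reach_end_alt (n : Int) (m : Int) (k : Int) (special_cells : List (Int × Int)) : Int :=
  let specials := PySem.List.sorted2
    (special_cells.filter (fun p => p.1 != n && p.2 != m))
    (fun p => p.1) (fun p => -p.2)
  let max_spec := pvBLoop [] 0 (specials.map (fun p => p.2))
  m + n - 2 - max_spec

-- ===== PRECONDITION & SPEC =====
def Spec_min_moves_to_reach_end (n : Int) (m : Int) (k : Int) (special_cells : List (Int × Int)) (out : Int) : Prop := out = min_moves_to_reach_end_alt n m k special_cells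
instance (n : Int) (m : Int) (k : Int) (special_cells : List (Int × Int)) (out : Int) : Decidable (Spec_min_moves_to_reach_end n m k special_cells out) := by unfold Spec_min_moves_to_reach_end; infer_instance

-- ===== CLAIM (what is proved, stated in full; the proofs are below) =====
def Claim_equal_min_moves_to_reach_end : Prop := ∀ (n : Int) (m : Int) (k : Int) (special_cells : List (Int × Int)), Dom_min_moves_to_reach_end n m k special_cells → Spec_min_moves_to_reach_end n m k special_cells (min_moves_to_reach_end n m k special_cells)

-- ===== LEMMAS AND PROOFS =====

-- Coupling invariant between A's patience pile tails `v` and B's processed pairs `a`: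
-- v is strictly increasing; every dp value is in [1, |v|]; and v[kk] is the least first
-- component among pairs with dp value kk+1 (and such a pair exists).
def pvInv (v : List Int) (a : List (Int × Int)) : Prop :=
  List.Pairwise (· < ·) v ∧
  (∀ p ∈ a, 1 ≤ p.2 ∧ p.2 ≤ (v.length : Int)) ∧
  (∀ kk : Nat, ∀ hk : kk < v.length,
    (∃ p ∈ a, p.2 = (kk : Int) + 1 ∧ p.1 = v[kk]) ∧
    (∀ p ∈ a, p.2 = (kk : Int) + 1 → v[kk] ≤ p.1))

lemma pvBBestAux (x : Int) (a : List (Int × Int)) : ∀ b : Int,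
    (a.foldl (fun best p => if p.1 < x ∧ p.2 > best then p.2 else best) b = b ∨
      ∃ p ∈ a, p.1 < x ∧
        a.foldl (fun best p => if p.1 < x ∧ p.2 > best then p.2 else best) b = p.2) ∧
    b ≤ a.foldl (fun best p => if p.1 < x ∧ p.2 > best then p.2 else best) b ∧
    (∀ p ∈ a, p.1 < x →
      p.2 ≤ a.foldl (fun best p => if p.1 < x ∧ p.2 > best then p.2 else best) b) := by
  induction a with
  | nil => intro b; simp
  | cons q a ih =>
    intro b
    simp only [List.foldl_cons]
    by_cases hq : q.1 < x ∧ q.2 > b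
    · rw [if_pos hq]
      obtain ⟨hcase, hle, hub⟩ := ih q.2
      refine ⟨?_, le_trans (le_of_lt hq.2) hle, ?_⟩
      · rcases hcase with h | ⟨p, hp, hpx, he⟩
        · exact Or.inr ⟨q, by simp, hq.1, h⟩
        · exact Or.inr ⟨p, by simp [hp], hpx, he⟩
      · intro p hp hpx
        rcases List.mem_cons.mp hp with rfl | hp
        · exact le_trans (le_refl p.2) hle
        · exact hub p hp hpx
    · rw [if_neg hq]
      obtain ⟨hcase, hle, hub⟩ := ih b
      refine ⟨?_, hle, ?_⟩
      · rcases hcase with h | ⟨p, hp, hpx, he⟩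
        · exact Or.inl h
        · exact Or.inr ⟨p, by simp [hp], hpx, he⟩
      · intro p hp hpx
        rcases List.mem_cons.mp hp with rfl | hp
        · have : ¬ p.2 > b := fun h => hq ⟨hpx, h⟩
          omega
        · exact hub p hp hpx

lemma pvBBest_cases (a : List (Int × Int)) (x : Int) :
    (pvBBest a x = 0 ∨ ∃ p ∈ a, p.1 < x ∧ pvBBest a x = p.2) ∧
    0 ≤ pvBBest a x ∧ (∀ p ∈ a, p.1 < x → p.2 ≤ pvBBest a x) :=
  pvBBestAux x a 0

lemma pvBBest_eq (v : List Int) (a : List (Int × Int)) (x : Int) (hInv : pvInv v a) :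
    pvBBest a x = (PySem.List.bisectLeft v x : Int) := by
  obtain ⟨hsort, hrange, hmin⟩ := hInv
  obtain ⟨hle, hlt, hge⟩ :=
    PySem.List.bisectLeft_spec v x (hsort.imp (fun h => le_of_lt h))
  set i := PySem.List.bisectLeft v x with hi
  -- every dp value of a pair with first component < x is ≤ i
  have hub : ∀ p ∈ a, p.1 < x → p.2 ≤ (i : Int) := by
    intro p hp hpx
    obtain ⟨h1, h2⟩ := hrange p hp
    set kk := (p.2 - 1).toNat with hkk
    have hpk : p.2 = (kk : Int) + 1 := by omega
    have hklen : kk < v.length := by omega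
    have hvk : v[kk] ≤ p.1 := (hmin kk hklen).2 p hp hpk
    by_contra hcon
    have hik : i ≤ kk := by omega
    have := hge kk hklen hik
    omega
  obtain ⟨hcase, h0, hbub⟩ := pvBBest_cases a x
  have hles : pvBBest a x ≤ (i : Int) := by
    rcases hcase with h | ⟨p, hp, hpx, he⟩
    · omega
    · rw [he]; exact hub p hp hpx
  have hges : (i : Int) ≤ pvBBest a x := by
    rcases Nat.eq_zero_or_pos i with h0' | hpos
    · omega
    · have hklen : i - 1 < v.length := by omega
      obtain ⟨p, hp, hpk, hpv⟩ := (hmin (i - 1) hklen).1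
      have hvx : v[i - 1] < x := hlt (i - 1) hklen (by omega)
      have := hbub p hp (by rw [hpv]; exact hvx)
      have : ((i - 1 : Nat) : Int) = (i : Int) - 1 := by omega
      omega
  omega

lemma pvStep_len (v : List Int) (x : Int) (hsort : List.Pairwise (· < ·) v) :
    ((pvAStep v x).length : Int) =
      if (PySem.List.bisectLeft v x : Int) + 1 > (v.length : Int)
      then (PySem.List.bisectLeft v x : Int) + 1 else (v.length : Int) := by
  obtain ⟨hle, hlt, hge⟩ :=
    PySem.List.bisectLeft_spec v x (hsort.imp (fun h => le_of_lt h))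
  unfold pvAStep
  by_cases h : PySem.List.bisectLeft v x = v.length
  · rw [if_neg (not_not_intro h), if_pos (by omega), h]
    simp
  · rw [if_pos h, if_neg (by omega)]
    simp

lemma pvStep_inv (v : List Int) (a : List (Int × Int)) (x : Int) (hInv : pvInv v a) :
    pvInv (pvAStep v x) (a ++ [(x, (PySem.List.bisectLeft v x : Int) + 1)]) := by
  obtain ⟨hsort, hrange, hmin⟩ := hInv
  obtain ⟨hle, hlt, hge⟩ :=
    PySem.List.bisectLeft_spec v x (hsort.imp (fun h => le_of_lt h))
  have hsg := List.pairwise_iff_getElem.mp hsort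
  unfold pvAStep
  generalize hg : PySem.List.bisectLeft v x = i at hle hlt hge ⊢
  by_cases h : i = v.length
  · -- append case
    rw [if_neg (not_not_intro h)]
    subst h
    refine ⟨?_, ?_, ?_⟩
    · rw [List.pairwise_append]
      exact ⟨hsort, List.pairwise_singleton _ _,
        by intro y hy z hz; simp at hz; subst hz
           obtain ⟨j, hj, rfl⟩ := List.mem_iff_getElem.mp hy
           exact hlt j hj hj⟩
    · intro p hp
      rcases List.mem_append.mp hp with hp | hp
      · obtain ⟨h1, h2⟩ := hrange p hp
        exact ⟨h1, by simp; omega⟩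
      · obtain rfl := List.mem_singleton.mp hp
        refine ⟨by simp, by simp⟩
    · intro kk hk
      simp at hk
      by_cases hkk : kk < v.length
      · have hvk : (v ++ [x])[kk] = v[kk] := List.getElem_append_left hkk
        refine ⟨?_, ?_⟩
        · obtain ⟨p, hp, hpk, hpv⟩ := (hmin kk hkk).1
          exact ⟨p, List.mem_append.mpr (Or.inl hp), hpk, by rw [hvk]; exact hpv⟩
        · intro p hp hpk
          rcases List.mem_append.mp hp with hp | hp
          · rw [hvk]; exact (hmin kk hkk).2 p hp hpk
          · exfalso
            obtain rfl := List.mem_singleton.mp hp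
            simp at hpk
            omega
      · have hkeq : kk = v.length := by omega
        subst hkeq
        have hvk : (v ++ [x])[v.length] = x := by simp
        refine ⟨⟨(x, (v.length : Int) + 1), List.mem_append.mpr (Or.inr (by simp)), by simp, by rw [hvk]⟩, ?_⟩
        intro p hp hpk
        rcases List.mem_append.mp hp with hp | hp
        · exfalso
          obtain ⟨h1, h2⟩ := hrange p hp
          omega
        · obtain rfl := List.mem_singleton.mp hp
          rw [hvk]
  · -- set case
    have hil : i < v.length := lt_of_le_of_ne hle h
    have hxle : x ≤ v[i] := hge i hil (le_refl i)
    rw [if_pos h]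
    have hlen : (v.set i x).length = v.length := by simp
    refine ⟨?_, ?_, ?_⟩
    · rw [List.pairwise_iff_getElem]
      intro j1 j2 hj1 hj2 hj12
      rw [hlen] at hj1 hj2
      rw [List.getElem_set, List.getElem_set]
      by_cases e1 : i = j1
      · subst e1
        rw [if_pos rfl, if_neg (by omega)]
        exact lt_of_le_of_lt hxle (hsg i j2 hj1 hj2 hj12)
      · rw [if_neg e1]
        by_cases e2 : i = j2
        · subst e2
          rw [if_pos rfl]
          exact hlt j1 hj1 (by omega)
        · rw [if_neg e2]
          exact hsg j1 j2 hj1 hj2 hj12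
    · intro p hp
      rcases List.mem_append.mp hp with hp | hp
      · obtain ⟨h1, h2⟩ := hrange p hp
        rw [hlen]; exact ⟨h1, h2⟩
      · obtain rfl := List.mem_singleton.mp hp
        rw [hlen]
        exact ⟨by simp, by simp; omega⟩
    · intro kk hk
      rw [hlen] at hk
      by_cases hki : kk = i
      · subst hki
        have hk2 : kk < v.length := by simpa using hk
        have hvk : (v.set kk x)[kk]'(by omega) = x := by
          rw [List.getElem_set, if_pos rfl]
        refine ⟨⟨(x, (kk : Int) + 1), List.mem_append.mpr (Or.inr (by simp)), by simp, by rw [hvk]⟩, ?_⟩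
        intro p hp hpk
        rcases List.mem_append.mp hp with hp | hp
        · rw [hvk]
          exact le_trans hxle ((hmin kk hk2).2 p hp hpk)
        · obtain rfl := List.mem_singleton.mp hp
          rw [hvk]
      · have hvk : (v.set i x)[kk]'(by omega) = v[kk] := by
          rw [List.getElem_set, if_neg (by omega)]
        refine ⟨?_, ?_⟩
        · obtain ⟨p, hp, hpk, hpv⟩ := (hmin kk hk).1
          exact ⟨p, List.mem_append.mpr (Or.inl hp), hpk, by rw [hvk]; exact hpv⟩
        · intro p hp hpk
          rcases List.mem_append.mp hp with hp | hp
          · rw [hvk]; exact (hmin kk hk).2 p hp hpk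
          · exfalso
            obtain rfl := List.mem_singleton.mp hp
            simp at hpk
            omega

lemma pvMain : ∀ (s : List Int) (v : List Int) (a : List (Int × Int)), pvInv v a →
    pvBLoop a (v.length : Int) s = ((s.foldl pvAStep v).length : Int) := by
  intro s
  induction s with
  | nil => intro v a _; rfl
  | cons x rest ih =>
    intro v a hInv
    have hb := pvBBest_eq v a x hInv
    have hstep := pvStep_inv v a x hInv
    have hlen := pvStep_len v x hInv.1
    show pvBLoop (a ++ [(x, pvBBest a x + 1)])
        (if pvBBest a x + 1 > (v.length : Int) then pvBBest a x + 1 else (v.length : Int)) rest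
      = ((List.foldl pvAStep (pvAStep v x) rest).length : Int)
    rw [hb, ← hlen]
    exact ih (pvAStep v x) _ hstep

lemma pvPatience_eq_dp (s : List Int) :
    ((pvLongestIncrLength s : Int)) = pvBLoop [] 0 s := by
  have h := pvMain s [] [] ⟨List.Pairwise.nil, by simp, by intro kk hk; simp at hk⟩
  simp only [List.length_nil, Int.natCast_zero] at h
  exact h.symm

-- ===== VERDICT (by name: the statement is the Claim_ definition above) =====
theorem min_moves_to_reach_end_spec : Claim_equal_min_moves_to_reach_end := by
  unfold Claim_equal_min_moves_to_reach_end
  intro n m k special_cells _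
  unfold Spec_min_moves_to_reach_end
  simp only [min_moves_to_reach_end, min_moves_to_reach_end_alt, pvPatience_eq_dp]
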